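-- pv_equiv track=rewrite | github.com/AlricLobo/TrumpingTweets | data.py | isStartTweet
-- ===== SOURCE A (Python) =====
-- def isStartTweet(text):
--     #how many . does the tweet start with? i.e. ...and then I said
--     count = 0
--     for i in text:
--         if i == '.':
--             count += 1
--         else:
--             return count
--     return count
-- ===== SOURCE B (Python) =====
-- def isStartTweet(text):
--     # count of leading '.' = length lost when stripping leading dots
--     return len(text) - len(text.lstrip('.'))
-- ===== Notes on version B (the rewrite author's own statement) =====
-- stated objective: simpler
-- what changed: Replaces the explicit scan-and-count loop with len(text) - len(text.lstrip('.')): a single strip plus arithmetic, no loop or accumulator.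
import Mathlib
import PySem

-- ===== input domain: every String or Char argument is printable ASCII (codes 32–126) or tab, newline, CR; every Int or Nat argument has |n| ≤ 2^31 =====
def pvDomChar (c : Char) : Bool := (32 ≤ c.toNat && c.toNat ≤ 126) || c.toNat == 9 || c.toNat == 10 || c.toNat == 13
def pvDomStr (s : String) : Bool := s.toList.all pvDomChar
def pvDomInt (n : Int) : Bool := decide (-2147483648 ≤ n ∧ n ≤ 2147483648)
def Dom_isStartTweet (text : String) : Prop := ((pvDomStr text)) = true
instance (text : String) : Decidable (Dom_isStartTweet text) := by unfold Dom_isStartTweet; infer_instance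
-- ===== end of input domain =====

-- B replaces A's scan-and-count loop with len(text) - len(text.lstrip('.')) (simpler, no loop).

-- ===== PORT A =====
-- the for-loop with early return, as structural recursion over the characters
def isStartTweetGo : List Char → Int → Int
  | [], count => count
  | c :: rest, count => if c == '.' then isStartTweetGo rest (count + 1) else count

def isStartTweet (text : String) : Int := isStartTweetGo text.toList 0

-- ===== PORT B =====
-- text.lstrip('.') is exactly dropWhile (· == '.') on the character list (ported by hand, exact)
def isStartTweet_alt (text : String) : Int :=
  (text.toList.length : Int) - ((text.toList.dropWhile (fun c => c == '.')).length : Int)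

-- ===== PRECONDITION & SPEC =====
def Spec_isStartTweet (text : String) (out : Int) : Prop := out = isStartTweet_alt text
instance (text : String) (out : Int) : Decidable (Spec_isStartTweet text out) := by unfold Spec_isStartTweet; infer_instance

-- ===== CLAIM (what is proved, stated in full; the proofs are below) =====
def Claim_equal_isStartTweet : Prop := ∀ (text : String), Dom_isStartTweet text → Spec_isStartTweet text (isStartTweet text)

-- ===== LEMMAS AND PROOFS =====
theorem isStartTweetGo_eq (l : List Char) (count : Int) :
    isStartTweetGo l count = count + ((l.length : Int) - ((l.dropWhile (fun c => c == '.')).length : Int)) := by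
  induction l generalizing count with
  | nil => simp [isStartTweetGo]
  | cons c rest ih =>
    by_cases h : c = '.'
    · simp [isStartTweetGo, h, List.dropWhile, ih]
      push_cast
      ring
    · have hd : List.dropWhile (fun c => c == '.') (c :: rest) = c :: rest := by
        rw [List.dropWhile_cons]
        simp [h]
      simp [isStartTweetGo, h, hd]

-- ===== VERDICT (by name: the statement is the Claim_ definition above) =====
theorem isStartTweet_spec : Claim_equal_isStartTweet := by
  intro text _
  unfold Spec_isStartTweet isStartTweet isStartTweet_alt
  simp [isStartTweetGo_eq]
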